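-- pv_equiv track=rewrite | github.com/AntonioRUguina/KPGDP | src/MathModels.py | evalSolution
-- ===== SOURCE A (Python) =====
-- def evalSolution(distance, sol):
--     minDist = 0x3f3f3f
--     n = len(sol)
--     for i in range(n):
--         ii, it = sol[i]  # Extract the first pair (i, t1)
--         for j in range(i + 1, n):
--             jj, jt = sol[j]  # Extract the second pair (j, t2)
--             if it == jt:
--                 minDist = min(minDist, distance[ii,jj])
--     return minDist
-- ===== SOURCE B (Python) =====
-- def evalSolution(distance, sol):
--     buckets = {}
--     for ii, it in sol:
--         buckets.setdefault(it, []).append(ii)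
--     minDist = 0x3f3f3f
--     for ids in buckets.values():
--         for k in range(len(ids)):
--             a = ids[k]
--             for b in ids[k + 1:]:
--                 minDist = min(minDist, distance[a, b])
--     return minDist
-- ===== Notes on version B (the rewrite author's own statement) =====
-- stated objective: alternative
-- what changed: B first groups element ids by type into a dict of buckets and then takes the min distance over ordered pairs within each bucket, instead of A's flat double index loop testing type equality on every cross pair.
import Mathlib
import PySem

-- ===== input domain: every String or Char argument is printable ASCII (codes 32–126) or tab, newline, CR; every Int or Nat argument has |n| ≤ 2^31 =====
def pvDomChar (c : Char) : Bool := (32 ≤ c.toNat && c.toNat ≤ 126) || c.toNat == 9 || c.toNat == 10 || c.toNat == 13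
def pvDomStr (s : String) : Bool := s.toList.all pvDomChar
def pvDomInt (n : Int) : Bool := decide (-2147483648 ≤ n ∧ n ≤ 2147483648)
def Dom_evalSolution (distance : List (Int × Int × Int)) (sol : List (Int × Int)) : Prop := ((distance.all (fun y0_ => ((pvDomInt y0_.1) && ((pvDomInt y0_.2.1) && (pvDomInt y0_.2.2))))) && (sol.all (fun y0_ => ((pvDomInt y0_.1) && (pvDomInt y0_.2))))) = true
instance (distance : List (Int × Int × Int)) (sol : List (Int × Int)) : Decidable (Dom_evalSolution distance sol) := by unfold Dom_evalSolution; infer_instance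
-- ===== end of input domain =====

-- B groups ids by type into buckets and scans ordered pairs inside each bucket only
-- (alternative decomposition; A tests type equality on every cross pair).

-- first-match association-list lookup of the distance dict at key (a, b); the default 0 is
-- only reachable on inputs where Python A raises KeyError, which Pre_ excludes
def pvLookup (distance : List (Int × Int × Int)) (a b : Int) : Int :=
  (((distance.find? (fun t => t.1 == a && t.2.1 == b)).map (fun t => t.2.2)).getD 0)

-- ===== PORT A =====
-- inner loop: for j in range(i+1, n)
def pvInnerA (distance : List (Int × Int × Int)) (ii it : Int) : List (Int × Int) → Int → Int
  | [], m => m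
  | q :: rest, m =>
      pvInnerA distance ii it rest (if it == q.2 then min m (pvLookup distance ii q.1) else m)

-- outer loop: for i in range(n)
def pvOuterA (distance : List (Int × Int × Int)) : List (Int × Int) → Int → Int
  | [], m => m
  | p :: rest, m => pvOuterA distance rest (pvInnerA distance p.1 p.2 rest m)

def evalSolution (distance : List (Int × Int × Int)) (sol : List (Int × Int)) : Int :=
  pvOuterA distance sol 0x3f3f3f

-- ===== PORT B =====
-- buckets.setdefault(it, []).append(ii) over sol
def pvBuckets (sol : List (Int × Int)) : PySem.Dict Int (List Int) :=
  sol.foldl (fun d p => d.modify p.2 [] (fun l => l ++ [p.1])) PySem.Dict.empty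

-- for b in ids[k+1:]
def pvRowB (distance : List (Int × Int × Int)) (a : Int) : List Int → Int → Int
  | [], m => m
  | b :: rest, m => pvRowB distance a rest (min m (pvLookup distance a b))

-- for k in range(len(ids))
def pvBucketMin (distance : List (Int × Int × Int)) : List Int → Int → Int
  | [], m => m
  | a :: rest, m => pvBucketMin distance rest (pvRowB distance a rest m)

def evalSolution_alt (distance : List (Int × Int × Int)) (sol : List (Int × Int)) : Int :=
  (pvBuckets sol).values.foldl (fun m ids => pvBucketMin distance ids m) 0x3f3f3f

-- ===== PRECONDITION & SPEC =====
-- Pre_ excludes exactly the inputs on which Python A raises KeyError: some same-type pair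
-- (i < j) whose id pair is not a key of the distance dict.
def Pre_evalSolution (distance : List (Int × Int × Int)) (sol : List (Int × Int)) : Prop :=
  ∀ i, i < sol.length → ∀ j, j < sol.length → i < j →
    (sol.getD i (0, 0)).2 = (sol.getD j (0, 0)).2 →
    (distance.find? (fun t => t.1 == (sol.getD i (0, 0)).1 && t.2.1 == (sol.getD j (0, 0)).1)).isSome = true
instance (distance : List (Int × Int × Int)) (sol : List (Int × Int)) : Decidable (Pre_evalSolution distance sol) := by
  unfold Pre_evalSolution; infer_instance

def pvWitness_evalSolution : (List (Int × Int × Int)) × (List (Int × Int)) :=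
  ([(0, 1, 5)], [(0, 7), (1, 7)])

def Spec_evalSolution (distance : List (Int × Int × Int)) (sol : List (Int × Int)) (out : Int) : Prop := out = evalSolution_alt distance sol
instance (distance : List (Int × Int × Int)) (sol : List (Int × Int)) (out : Int) : Decidable (Spec_evalSolution distance sol out) := by unfold Spec_evalSolution; infer_instance

-- ===== CLAIM (what is proved, stated in full; the proofs are below) =====
def Claim_equal_evalSolution : Prop := ∀ (distance : List (Int × Int × Int)) (sol : List (Int × Int)), Dom_evalSolution distance sol → Pre_evalSolution distance sol → Spec_evalSolution distance sol (evalSolution distance sol)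

-- ===== LEMMAS AND PROOFS =====

-- the list of distances A's loops feed to min, and B's bucket variants
def pvBlockA (d : List (Int × Int × Int)) (ii it : Int) (l : List (Int × Int)) : List Int :=
  l.filterMap (fun q => if it == q.2 then some (pvLookup d ii q.1) else none)

def pvPairsA (d : List (Int × Int × Int)) : List (Int × Int) → List Int
  | [] => []
  | p :: rest => pvBlockA d p.1 p.2 rest ++ pvPairsA d rest

def pvPairsB (d : List (Int × Int × Int)) : List Int → List Int
  | [] => []
  | a :: rest => rest.map (fun b => pvLookup d a b) ++ pvPairsB d rest

def pvIdsOf (t : Int) (l : List (Int × Int)) : List Int :=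
  (l.filter (fun p => p.2 == t)).map (fun p => p.1)

theorem pvRowB_eq (d : List (Int × Int × Int)) (a : Int) (l : List Int) (m : Int) :
    pvRowB d a l m = List.foldl min m (l.map (fun b => pvLookup d a b)) := by
  induction l generalizing m with
  | nil => rfl
  | cons b rest ih => simp [pvRowB, ih]

theorem pvBucketMin_eq (d : List (Int × Int × Int)) (l : List Int) (m : Int) :
    pvBucketMin d l m = List.foldl min m (pvPairsB d l) := by
  induction l generalizing m with
  | nil => rfl
  | cons a rest ih => simp [pvBucketMin, ih, pvPairsB, pvRowB_eq, List.foldl_append]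

theorem pvInnerA_eq (d : List (Int × Int × Int)) (ii it : Int) (l : List (Int × Int)) (m : Int) :
    pvInnerA d ii it l m = List.foldl min m (pvBlockA d ii it l) := by
  induction l generalizing m with
  | nil => rfl
  | cons q rest ih =>
      rw [pvInnerA, ih]
      by_cases h : it = q.2 <;> simp [pvBlockA, h]

theorem pvOuterA_eq (d : List (Int × Int × Int)) (l : List (Int × Int)) (m : Int) :
    pvOuterA d l m = List.foldl min m (pvPairsA d l) := by
  induction l generalizing m with
  | nil => rfl
  | cons p rest ih => simp [pvOuterA, ih, pvPairsA, pvInnerA_eq, List.foldl_append]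

theorem pvFoldBuckets_eq (d : List (Int × Int × Int)) (L : List (List Int)) (m : Int) :
    L.foldl (fun m ids => pvBucketMin d ids m) m = List.foldl min m (L.flatMap (pvPairsB d)) := by
  induction L generalizing m with
  | nil => rfl
  | cons ids rest ih =>
      rw [List.foldl_cons, ih, pvBucketMin_eq, List.flatMap_cons, List.foldl_append]

theorem pvBlockA_eq_map (d : List (Int × Int × Int)) (ii it : Int) (l : List (Int × Int)) :
    pvBlockA d ii it l = (pvIdsOf it l).map (fun b => pvLookup d ii b) := by
  induction l with
  | nil => rfl
  | cons q rest ih =>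
      by_cases h : it = q.2
      · have hb : pvBlockA d ii it (q :: rest) = pvLookup d ii q.1 :: pvBlockA d ii it rest := by
          simp [pvBlockA, h]
        have hi : pvIdsOf it (q :: rest) = q.1 :: pvIdsOf it rest := by
          simp [pvIdsOf, h]
        rw [hb, hi, List.map_cons, ih]
      · have h' : ¬(q.2 = it) := fun hh => h hh.symm
        have hb : pvBlockA d ii it (q :: rest) = pvBlockA d ii it rest := by
          simp [pvBlockA, h]
        have hi : pvIdsOf it (q :: rest) = pvIdsOf it rest := by
          simp [pvIdsOf, h']
        rw [hb, hi, ih]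

theorem pvBuckets_getD (sol : List (Int × Int)) (t : Int) :
    (pvBuckets sol).getD t [] = pvIdsOf t sol := by
  have h : pvBuckets sol
      = (sol.map (fun p => (p.2, p.1))).foldl
          (fun d q => d.modify q.1 [] (fun l => l ++ [q.2])) PySem.Dict.empty := by
    simp [pvBuckets, List.foldl_map]
  rw [h, PySem.Dict.getD_foldl_modify_append]
  simp [pvIdsOf, PySem.Dict.getD_empty, List.filter_map, List.map_map, Function.comp_def]

theorem pvBuckets_keys_nodup (sol : List (Int × Int)) : (pvBuckets sol).keys.Nodup := by
  have := PySem.Dict.nodup_keys_foldl_modify_key sol (fun p => p.2) []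
      (fun _ p => (fun l => l ++ [p.1])) PySem.Dict.empty (by simp [PySem.Dict.keys_empty])
  simpa [pvBuckets] using this

theorem pvBuckets_keys_mem (sol : List (Int × Int)) (t : Int) :
    t ∈ (pvBuckets sol).keys ↔ t ∈ sol.map (fun p => p.2) := by
  have h : (pvBuckets sol).keys
      = PySem.Set.update (PySem.Dict.empty : PySem.Dict Int (List Int)).keys
          (sol.map (fun p => p.2)) := by
    simpa [pvBuckets] using
      PySem.Dict.keys_foldl_modify_key sol (fun p => p.2) []
        (fun _ p => (fun l => l ++ [p.1])) PySem.Dict.empty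
  rw [h]
  simp [PySem.Set.mem_update, PySem.Dict.keys_empty]

theorem pv_perm_middle (blk A X : List Int) :
    List.Perm (A ++ (blk ++ X)) (blk ++ (A ++ X)) := by
  have h1 : A ++ (blk ++ X) = (A ++ blk) ++ X := (List.append_assoc _ _ _).symm
  have h2 : (blk ++ A) ++ X = blk ++ (A ++ X) := List.append_assoc _ _ _
  rw [h1, ← h2]
  exact (List.perm_append_comm).append_right X

theorem pv_flatMap_congr {α β : Type} (l : List α) (f g : α → List β)
    (h : ∀ a ∈ l, f a = g a) : l.flatMap f = l.flatMap g := by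
  induction l with
  | nil => rfl
  | cons a rest ih =>
      simp [List.flatMap_cons, h a (by simp), ih (fun a ha => h a (by simp [ha]))]

theorem pv_main_perm (d : List (Int × Int × Int)) (sol : List (Int × Int)) (T : List Int)
    (hnd : T.Nodup) (hmem : ∀ p ∈ sol, p.2 ∈ T) :
    List.Perm (T.flatMap (fun t => pvPairsB d (pvIdsOf t sol))) (pvPairsA d sol) := by
  induction sol generalizing T with
  | nil =>
      simp [pvIdsOf, pvPairsB, pvPairsA]
  | cons p rest ih =>
      have hit : p.2 ∈ T := hmem p (by simp)
      obtain ⟨T₁, T₂, rfl⟩ := List.append_of_mem hit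
      have hnd' := hnd
      rw [List.nodup_append] at hnd'
      obtain ⟨h1, h2, h3⟩ := hnd'
      have hnotin₁ : p.2 ∉ T₁ := fun hx => h3 p.2 hx p.2 (by simp) rfl
      have hnotin₂ : p.2 ∉ T₂ := (List.nodup_cons.1 h2).1
      have hids : ∀ t : Int, pvIdsOf t (p :: rest)
          = if p.2 = t then p.1 :: pvIdsOf t rest else pvIdsOf t rest := by
        intro t
        by_cases h : p.2 = t <;> simp [pvIdsOf, h]
      have hg₁ : ∀ t ∈ T₁, pvPairsB d (pvIdsOf t (p :: rest)) = pvPairsB d (pvIdsOf t rest) := by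
        intro t ht
        have hne : ¬ p.2 = t := by intro hpt; rw [hpt] at hnotin₁; exact hnotin₁ ht
        rw [hids t, if_neg hne]
      have hg₂ : ∀ t ∈ T₂, pvPairsB d (pvIdsOf t (p :: rest)) = pvPairsB d (pvIdsOf t rest) := by
        intro t ht
        have hne : ¬ p.2 = t := by intro hpt; rw [hpt] at hnotin₂; exact hnotin₂ ht
        rw [hids t, if_neg hne]
      have hself : pvPairsB d (pvIdsOf p.2 (p :: rest))
          = (pvIdsOf p.2 rest).map (fun b => pvLookup d p.1 b) ++ pvPairsB d (pvIdsOf p.2 rest) := by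
        rw [hids p.2, if_pos rfl]; rfl
      have hih : List.Perm ((T₁ ++ p.2 :: T₂).flatMap (fun t => pvPairsB d (pvIdsOf t rest)))
          (pvPairsA d rest) :=
        ih (T₁ ++ p.2 :: T₂) hnd (fun q hq => hmem q (by simp [hq]))
      have e1 : (T₁ ++ p.2 :: T₂).flatMap (fun t => pvPairsB d (pvIdsOf t (p :: rest)))
          = T₁.flatMap (fun t => pvPairsB d (pvIdsOf t rest))
            ++ ((pvIdsOf p.2 rest).map (fun b => pvLookup d p.1 b)
              ++ (pvPairsB d (pvIdsOf p.2 rest)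
                ++ T₂.flatMap (fun t => pvPairsB d (pvIdsOf t rest)))) := by
        rw [List.flatMap_append, List.flatMap_cons,
          pv_flatMap_congr T₁ _ _ hg₁, pv_flatMap_congr T₂ _ _ hg₂, hself]
        simp [List.append_assoc]
      have e2 : T₁.flatMap (fun t => pvPairsB d (pvIdsOf t rest))
            ++ (pvPairsB d (pvIdsOf p.2 rest)
              ++ T₂.flatMap (fun t => pvPairsB d (pvIdsOf t rest)))
          = (T₁ ++ p.2 :: T₂).flatMap (fun t => pvPairsB d (pvIdsOf t rest)) := by
        simp [List.flatMap_append, List.flatMap_cons]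
      have e3 : pvPairsA d (p :: rest)
          = (pvIdsOf p.2 rest).map (fun b => pvLookup d p.1 b) ++ pvPairsA d rest := by
        simp [pvPairsA, pvBlockA_eq_map]
      have hih' : List.Perm (T₁.flatMap (fun t => pvPairsB d (pvIdsOf t rest))
            ++ (pvPairsB d (pvIdsOf p.2 rest)
              ++ T₂.flatMap (fun t => pvPairsB d (pvIdsOf t rest)))) (pvPairsA d rest) := by
        rw [e2]; exact hih
      rw [e1, e3]
      exact (pv_perm_middle _ _ _).trans (hih'.append_left _)

-- ===== VERDICT (by name: the statement is the Claim_ definition above) =====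
theorem evalSolution_spec : Claim_equal_evalSolution := by
  intro distance sol _ _
  unfold Spec_evalSolution
  have hA : evalSolution distance sol = List.foldl min 0x3f3f3f (pvPairsA distance sol) := by
    simp [evalSolution, pvOuterA_eq]
  have hvals : (pvBuckets sol).values
      = (pvBuckets sol).keys.map (fun k => pvIdsOf k sol) := by
    rw [PySem.Dict.values_eq_map_keys (pvBuckets sol) (pvBuckets_keys_nodup sol) []]
    exact List.map_congr_left (fun k _ => pvBuckets_getD sol k)
  have hB : evalSolution_alt distance sol
      = List.foldl min 0x3f3f3f
          ((pvBuckets sol).keys.flatMap (fun t => pvPairsB distance (pvIdsOf t sol))) := by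
    rw [evalSolution_alt, pvFoldBuckets_eq, hvals, List.flatMap_map]
  have hperm := pv_main_perm distance sol (pvBuckets sol).keys (pvBuckets_keys_nodup sol)
    (fun p hp => (pvBuckets_keys_mem sol p.2).2 (List.mem_map.2 ⟨p, hp, rfl⟩))
  rw [hA, hB]
  exact ((hperm.foldl_eq' (fun x _ y _ z => min_right_comm z x y)) 0x3f3f3f).symm
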